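-- pv_equiv track=rewrite | github.com/Korred/advent_of_code_2023 | day_13/task_1_2.py | find_reflection_index
-- ===== SOURCE A (Python) =====
-- def find_reflection_index(pattern: list[int], find_smudge: bool = False) -> int:
--     for i in range(1, len(pattern)):
--         left, right = pattern[:i][::-1], pattern[i:]
--
--         length = min(len(left), len(right))
--         # truncate the longer list to the length of the shorter one
--         left, right = left[:length], right[:length]
--
--         if find_smudge:
--             diff = [a ^ b for a, b in zip(left, right) if a != b]
--             if len(diff) == 1 and (diff[0] != 0 and diff[0] & (diff[0] - 1) == 0):
--                 return i
--         else:
--             if left == right: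
--                 return i
--     # if no reflection is found, return -1
--     return -1
-- ===== SOURCE B (Python) =====
-- def _mirror_ok(pattern, i, find_smudge):
--     n = len(pattern)
--     mism = 0
--     d = 0
--     for j in range(min(i, n - i)):
--         a, b = pattern[i - 1 - j], pattern[i + j]
--         if a != b:
--             mism += 1
--             if mism > 1:
--                 return False
--             d = a ^ b
--     if find_smudge:
--         return mism == 1 and d != 0 and d & (d - 1) == 0
--     return mism == 0
--
--
-- def find_reflection_index(pattern: list[int], find_smudge: bool = False) -> int:
--     for i in range(1, len(pattern)):
--         if _mirror_ok(pattern, i, find_smudge):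
--             return i
--     return -1
-- ===== Notes on version B (the rewrite author's own statement) =====
-- stated objective: faster
-- what changed: B replaces A's per-axis slice/reverse/truncate and diff-list construction with an in-place two-index walk outward from the axis that counts mismatches and exits as soon as a second mismatch is seen, allocating nothing.
import Mathlib
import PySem

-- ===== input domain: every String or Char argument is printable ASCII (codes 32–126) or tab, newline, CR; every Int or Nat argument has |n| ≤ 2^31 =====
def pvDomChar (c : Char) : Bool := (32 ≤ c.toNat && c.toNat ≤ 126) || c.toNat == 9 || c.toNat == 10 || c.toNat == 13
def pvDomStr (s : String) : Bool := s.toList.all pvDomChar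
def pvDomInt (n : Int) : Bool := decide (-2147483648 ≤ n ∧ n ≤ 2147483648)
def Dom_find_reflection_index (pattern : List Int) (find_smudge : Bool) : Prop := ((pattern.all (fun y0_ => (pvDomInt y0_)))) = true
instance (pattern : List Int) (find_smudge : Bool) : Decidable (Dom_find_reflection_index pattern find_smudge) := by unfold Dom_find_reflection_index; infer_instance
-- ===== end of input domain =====

-- B replaces A's per-axis slice/reverse/truncate and diff-list construction by an in-place
-- two-index walk outward from the axis counting mismatches with an early exit (objective: alternative).

-- ===== PORT A =====
-- body of A's loop for one axis i
def pvPredA (pattern : List Int) (find_smudge : Bool) (i : Int) : Bool :=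
  let left := (PySem.List.slice? (PySem.List.slice pattern none (some i)) none none (-1)).getD []
  let right := PySem.List.slice pattern (some i) none
  let length := min left.length right.length
  let left := PySem.List.slice left none (some (length : Int))
  let right := PySem.List.slice right none (some (length : Int))
  if find_smudge then
    let diff := (left.zip right).filterMap (fun p => if p.1 ≠ p.2 then some (PySem.Int.bxor p.1 p.2) else none)
    let d0 := PySem.List.pyGetD diff 0 0
    diff.length == 1 && (!(d0 == 0) && PySem.Int.band d0 (d0 - 1) == 0)
  else
    left == right

-- 'for i in …: if …: return i' / 'return -1'
def pvLoopA (pattern : List Int) (find_smudge : Bool) : List Int → Int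
  | [] => -1
  | i :: rest => if pvPredA pattern find_smudge i then i else pvLoopA pattern find_smudge rest

def find_reflection_index (pattern : List Int) (find_smudge : Bool) : Int :=
  pvLoopA pattern find_smudge (PySem.List.pyRange 1 (pattern.length : Int) 1)

-- ===== PORT B =====
-- B's inner loop: rem = remaining iterations, j = current offset, mism/d the accumulators;
-- none = the early 'return False'
def pvScan (pattern : List Int) (i : Int) : Nat → Int → Int → Int → Option (Int × Int)
  | 0, _j, mism, d => some (mism, d)
  | rem + 1, j, mism, d =>
    let a := PySem.List.pyGetD pattern (i - 1 - j) 0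
    let b := PySem.List.pyGetD pattern (i + j) 0
    if a ≠ b then
      if mism + 1 > 1 then none
      else pvScan pattern i rem (j + 1) (mism + 1) (PySem.Int.bxor a b)
    else pvScan pattern i rem (j + 1) mism d

-- B's helper _mirror_ok
def pvMirrorOk (pattern : List Int) (i : Int) (find_smudge : Bool) : Bool :=
  match pvScan pattern i (min i ((pattern.length : Int) - i)).toNat 0 0 0 with
  | none => false
  | some (mism, d) =>
    if find_smudge then mism == 1 && (!(d == 0) && PySem.Int.band d (d - 1) == 0)
    else mism == 0

def pvLoopB (pattern : List Int) (find_smudge : Bool) : List Int → Int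
  | [] => -1
  | i :: rest => if pvMirrorOk pattern i find_smudge then i else pvLoopB pattern find_smudge rest

def find_reflection_index_alt (pattern : List Int) (find_smudge : Bool) : Int :=
  pvLoopB pattern find_smudge (PySem.List.pyRange 1 (pattern.length : Int) 1)

-- ===== PRECONDITION & SPEC =====
def Spec_find_reflection_index (pattern : List Int) (find_smudge : Bool) (out : Int) : Prop := out = find_reflection_index_alt pattern find_smudge
instance (pattern : List Int) (find_smudge : Bool) (out : Int) : Decidable (Spec_find_reflection_index pattern find_smudge out) := by unfold Spec_find_reflection_index; infer_instance

-- ===== CLAIM (what is proved, stated in full; the proofs are below) =====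
def Claim_equal_find_reflection_index : Prop := ∀ (pattern : List Int) (find_smudge : Bool), Dom_find_reflection_index pattern find_smudge → Spec_find_reflection_index pattern find_smudge (find_reflection_index pattern find_smudge)

-- ===== LEMMAS AND PROOFS =====

-- the xor-list A builds for one axis, as a function of the zipped pair list
def pvDiffOf (ps : List (Int × Int)) : List Int :=
  ps.filterMap (fun p => if p.1 ≠ p.2 then some (PySem.Int.bxor p.1 p.2) else none)

-- pvScan rephrased over the materialised pair list
def pvScanL : List (Int × Int) → Int → Int → Option (Int × Int)
  | [], m, d => some (m, d)
  | (a, b) :: t, m, d =>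
    if a ≠ b then (if m + 1 > 1 then none else pvScanL t (m + 1) (PySem.Int.bxor a b))
    else pvScanL t m d

lemma pvScanL_one (t : List (Int × Int)) (x : Int) :
    pvScanL t 1 x = if pvDiffOf t = [] then some (1, x) else none := by
  induction t generalizing x with
  | nil => simp [pvScanL, pvDiffOf]
  | cons p t ih =>
    obtain ⟨a, b⟩ := p
    by_cases hab : a = b
    · rw [show pvDiffOf ((a, b) :: t) = pvDiffOf t by simp [pvDiffOf, hab]]
      simpa [pvScanL, hab] using ih x
    · simp [pvScanL, pvDiffOf, hab]

lemma pvScanL_zero_nil (ps : List (Int × Int)) (h : pvDiffOf ps = []) :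
    pvScanL ps 0 0 = some (0, 0) := by
  induction ps with
  | nil => rfl
  | cons p t ih =>
    obtain ⟨a, b⟩ := p
    by_cases hab : a = b
    · simp only [pvDiffOf, List.filterMap_cons, hab] at h
      simp only [pvScanL, hab, ne_eq, not_true_eq_false, if_false, ite_self]
      exact ih (by simpa [pvDiffOf] using h)
    · simp [pvDiffOf, hab] at h

lemma pvScanL_zero_one (ps : List (Int × Int)) (x : Int) (h : pvDiffOf ps = [x]) :
    pvScanL ps 0 0 = some (1, x) := by
  induction ps with
  | nil => simp [pvDiffOf] at h
  | cons p t ih =>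
    obtain ⟨a, b⟩ := p
    by_cases hab : a = b
    · simp only [pvDiffOf, List.filterMap_cons, hab] at h
      simp only [pvScanL, hab, ne_eq, not_true_eq_false, if_false, ite_self]
      exact ih (by simpa [pvDiffOf] using h)
    · simp only [pvDiffOf, List.filterMap_cons, hab, ne_eq, not_false_eq_true, if_true] at h
      obtain ⟨hx, ht⟩ := List.cons_eq_cons.mp h
      simp only [pvScanL, hab, ne_eq, not_false_eq_true, if_true,
        show ¬((0:Int) + 1 > 1) by omega, if_false]
      rw [show (0:Int) + 1 = 1 by norm_num, pvScanL_one,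
        if_pos (show pvDiffOf t = [] from ht), hx]

lemma pvScanL_zero_many (ps : List (Int × Int)) (h : 2 ≤ (pvDiffOf ps).length) :
    pvScanL ps 0 0 = none := by
  induction ps with
  | nil => simp [pvDiffOf] at h
  | cons p t ih =>
    obtain ⟨a, b⟩ := p
    by_cases hab : a = b
    · simp only [pvDiffOf, List.filterMap_cons, hab] at h
      simp only [pvScanL, hab, ne_eq, not_true_eq_false, if_false, ite_self]
      exact ih (by simpa [pvDiffOf] using h)
    · simp only [pvDiffOf, List.filterMap_cons, hab, ne_eq, not_false_eq_true, if_true,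
        List.length_cons] at h
      simp only [pvScanL, hab, ne_eq, not_false_eq_true, if_true,
        show ¬((0:Int) + 1 > 1) by omega, if_false]
      rw [show (0:Int) + 1 = 1 by norm_num, pvScanL_one]
      have : ¬ pvDiffOf t = [] := by
        intro h0
        simp only [pvDiffOf] at h0
        rw [h0] at h
        simp at h
      simp [this]

lemma pvDiffOf_zip_self (l : List Int) : pvDiffOf (l.zip l) = [] := by
  induction l with
  | nil => rfl
  | cons a t ih => simpa [pvDiffOf, List.zip_cons_cons] using ih

lemma pv_eq_of_diff_nil (l r : List Int) (hlen : l.length = r.length)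
    (h : pvDiffOf (l.zip r) = []) : l = r := by
  induction l generalizing r with
  | nil => cases r <;> simp_all
  | cons a t ih =>
    cases r with
    | nil => simp at hlen
    | cons b u =>
      simp only [pvDiffOf, List.zip_cons_cons, List.filterMap_cons] at h
      by_cases hab : a = b
      · subst hab
        simp only [ne_eq, not_true_eq_false, if_neg, ite_self] at h
        have := ih u (by simpa using hlen) (by simpa [pvDiffOf] using h)
        simp [this]
      · simp [hab] at h

lemma pvScan_bridge (pattern : List Int) (k : Nat) (hk2 : k < pattern.length) :
    ∀ (rem j : Nat) (m d : Int), j + rem = min k (pattern.length - k) →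
    pvScan pattern (k : Int) rem (j : Int) m d
      = pvScanL (((((pattern.take k).reverse).take (min k (pattern.length - k))).zip
          ((pattern.drop k).take (min k (pattern.length - k)))).drop j) m d := by
  intro rem
  set n := pattern.length with hn
  set L := min k (n - k) with hL
  have hlft : ((pattern.take k).reverse).length = k := by
    simp [List.length_take]; omega
  have hrgt : ((pattern.drop k).length) = n - k := by simp; omega
  have hPlen : (((((pattern.take k).reverse).take L).zip
      ((pattern.drop k).take L))).length = L := by
    simp [List.length_zip, List.length_take, hlft]; omega
  induction rem with
  | zero =>
    intro j m d hj
    rw [List.drop_eq_nil_of_le (by omega)]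
    rfl
  | succ rem ih =>
    intro j m d hj
    have hjL : j < L := by omega
    have hgetl : (((pattern.take k).reverse).take L)[j]'(by simp [List.length_take]; omega)
        = pattern[k - 1 - j]'(by omega) := by
      rw [List.getElem_take, List.getElem_reverse, List.getElem_take]
      congr 1
      simp [List.length_take]
      omega
    have hgetr : (((pattern.drop k).take L))[j]'(by simp [List.length_take]; omega)
        = pattern[k + j]'(by omega) := by
      rw [List.getElem_take, List.getElem_drop]
    have hdrop : (((((pattern.take k).reverse).take L).zip ((pattern.drop k).take L))).drop j
        = (pattern[k - 1 - j]'(by omega), pattern[k + j]'(by omega)) ::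
          (((((pattern.take k).reverse).take L).zip ((pattern.drop k).take L))).drop (j + 1) := by
      rw [← List.getElem_cons_drop
        (show j < (((((pattern.take k).reverse).take L).zip ((pattern.drop k).take L))).length by omega)]
      congr 1
      rw [List.getElem_zip, hgetl, hgetr]
    have ha : PySem.List.pyGetD pattern ((k : Int) - 1 - (j : Int)) 0
        = pattern[k - 1 - j]'(by omega) := by
      rw [PySem.List.pyGetD_eq_getElem _ _ (by omega) (by omega)]
      congr 1
      all_goals omega
    have hb : PySem.List.pyGetD pattern ((k : Int) + (j : Int)) 0
        = pattern[k + j]'(by omega) := by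
      rw [PySem.List.pyGetD_eq_getElem _ _ (by omega) (by omega)]
      congr 1
      all_goals omega
    rw [hdrop]
    show (let a := PySem.List.pyGetD pattern ((k : Int) - 1 - (j : Int)) 0
          let b := PySem.List.pyGetD pattern ((k : Int) + (j : Int)) 0
          if a ≠ b then
            if m + 1 > 1 then none
            else pvScan pattern (k : Int) rem ((j : Int) + 1) (m + 1) (PySem.Int.bxor a b)
          else pvScan pattern (k : Int) rem ((j : Int) + 1) m d) = _
    simp only [ha, hb, pvScanL]
    have hcast : (j : Int) + 1 = ((j + 1 : Nat) : Int) := by push_cast; ring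
    by_cases hab : pattern[k - 1 - j]'(by omega) = pattern[k + j]'(by omega)
    · simp only [hab, ne_eq, not_true_eq_false, if_false, ite_self, hcast]
      exact ih (j + 1) m d (by omega)
    · simp only [ne_eq, hab, not_false_eq_true, if_true]
      by_cases hm : m + 1 > 1
      · simp [hm]
      · simp only [if_neg hm, hcast]
        exact ih (j + 1) (m + 1) (PySem.Int.bxor _ _) (by omega)

lemma pvPred_eq (pattern : List Int) (s : Bool) (k : Nat) (hk1 : 1 ≤ k)
    (hk2 : k < pattern.length) :
    pvPredA pattern s (k : Int) = pvMirrorOk pattern (k : Int) s := by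
  set n := pattern.length with hn
  set L := min k (n - k) with hL
  set lft := ((pattern.take k).reverse).take L with hlft
  set rgt := (pattern.drop k).take L with hrgt
  have hlenl : lft.length = L := by simp [hlft, List.length_take]; omega
  have hlenr : rgt.length = L := by simp [hrgt, List.length_take]; omega
  -- reduce A's slices
  have hA : pvPredA pattern s (k : Int)
      = (if s then
          (pvDiffOf (lft.zip rgt)).length == 1 &&
            (!(PySem.List.pyGetD (pvDiffOf (lft.zip rgt)) 0 0 == 0) &&
             PySem.Int.band (PySem.List.pyGetD (pvDiffOf (lft.zip rgt)) 0 0)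
               (PySem.List.pyGetD (pvDiffOf (lft.zip rgt)) 0 0 - 1) == 0)
        else lft == rgt) := by
    unfold pvPredA
    rw [PySem.List.slice_to_natCast, PySem.List.slice_from_natCast,
        PySem.List.slice?_none_none_neg_one]
    simp only [Option.getD_some]
    have hmin : min ((pattern.take k).reverse).length (pattern.drop k).length = L := by
      simp [List.length_take]; omega
    rw [hmin]
    rw [PySem.List.slice_to_natCast, PySem.List.slice_to_natCast]
    rfl
  -- reduce B's scan
  have htoNat : ((k : Int) ⊓ ((pattern.length : Int) - (k : Int))).toNat = L := by omega
  have hB : pvMirrorOk pattern (k : Int) s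
      = (match pvScanL (lft.zip rgt) 0 0 with
          | none => false
          | some (mism, d) =>
            if s then mism == 1 && (!(d == 0) && PySem.Int.band d (d - 1) == 0)
            else mism == 0) := by
    unfold pvMirrorOk
    rw [htoNat]
    have hbr := pvScan_bridge pattern k hk2 L 0 0 0 (by omega)
    simp only [Nat.cast_zero, List.drop_zero] at hbr
    rw [hbr]
  rw [hA, hB]
  cases hD : pvDiffOf (lft.zip rgt) with
  | nil =>
    have heq : lft = rgt := pv_eq_of_diff_nil lft rgt (by omega) hD
    rw [pvScanL_zero_nil _ hD]
    cases s <;> simp [heq, hD]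
  | cons x t =>
    have hne : ¬ lft = rgt := by
      intro heq
      rw [heq, pvDiffOf_zip_self] at hD
      simp at hD
    cases t with
    | nil =>
      rw [pvScanL_zero_one _ x hD]
      cases s <;> simp [hD, hne, PySem.List.pyGetD_zero]
    | cons y u =>
      rw [pvScanL_zero_many _ (by rw [hD]; simp)]
      cases s <;> simp [hD, hne]

lemma pvLoop_eq (pattern : List Int) (s : Bool) :
    ∀ l : List Int, (∀ i ∈ l, 1 ≤ i ∧ i < (pattern.length : Int)) →
    pvLoopA pattern s l = pvLoopB pattern s l := by
  intro l
  induction l with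
  | nil => intro _; rfl
  | cons i rest ih =>
    intro h
    have hi := h i (by simp)
    obtain ⟨k, hk⟩ : ∃ k : Nat, i = (k : Int) :=
      ⟨i.toNat, (Int.toNat_of_nonneg (by omega)).symm⟩
    subst hk
    have hpred := pvPred_eq pattern s k (by omega) (by omega)
    simp only [pvLoopA, pvLoopB, hpred]
    rw [ih (fun j hj => h j (by simp [hj]))]

-- ===== VERDICT (by name: the statement is the Claim_ definition above) =====
theorem find_reflection_index_spec : Claim_equal_find_reflection_index := by
  intro pattern find_smudge _
  unfold Spec_find_reflection_index find_reflection_index find_reflection_index_alt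
  exact pvLoop_eq pattern find_smudge _
    (fun i hi => by simpa using (PySem.List.mem_pyRange_one.mp hi))
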